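-- pv_equiv track=rewrite | github.com/jJup0/LeetCode | Hard/2009. Minimum Number of Operations to Make Array Continuous.py | minOperations_bisect
-- ===== SOURCE A (Python) =====
-- import bisect
--
-- def minOperations_bisect(nums: list[int]) -> int:
--     """
--     For a minimum size consecutive sequence, either the first of last number
--     must already be in nums.
--     Iterate through each number and check cost for if this number is the first
--     or last number used in the continuous sequeunce.
--     O(n*log(n)) / O(n*log(n))
--     """
--     # edge case, would otherwise cause runtime error when using bisect
--     if len(nums) == 1:
--         return 0
--
--     # use unique nums in order to binary search array for start/end number.
--     # Duplicates ruin binary search result.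
--     sorted_unique_nums = sorted(set(nums))
--
--     unique_nums_length = len(sorted_unique_nums)
--     original_length = len(nums)
--     res = original_length
--
--     for i, num in enumerate(sorted_unique_nums):
--         # num as first number
--         target_last_number = num + original_length - 1
--         r_idx = bisect.bisect(sorted_unique_nums, target_last_number, lo=i)
--         # if sorted_unique_nums[r_idx] is the target number, then we can reduce cost by 1
--         last_number_included = (
--             r_idx < unique_nums_length
--             and sorted_unique_nums[r_idx] == target_last_number
--         )
--         cost_num_is_first = i + (original_length - r_idx) - last_number_included
--
--         # analogously for num as last number
--         target_first_number = num - original_length + 1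
--         l_idx = bisect.bisect(sorted_unique_nums, target_first_number, hi=i)
--         first_number_included = sorted_unique_nums[l_idx] == target_first_number
--         cost_num_is_last = l_idx + (original_length - i) - first_number_included
--
--         res = min(res, cost_num_is_first, cost_num_is_last)
--     return res
-- ===== SOURCE B (Python) =====
-- def minOperations_bisect(nums: list[int]) -> int:
--     n = len(nums)
--     unique = sorted(set(nums))
--     res = n
--     left = 0
--     for right in range(len(unique)):
--         while unique[right] - unique[left] >= n:
--             left += 1
--         res = min(res, n - (right - left + 1))
--     return res
-- ===== Notes on version B (the rewrite author's own statement) =====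
-- stated objective: faster
-- what changed: Replaces A's per-element pair of binary searches (num as first / num as last of the window) over the sorted unique array with a single two-pointer sliding window that keeps the amortized-linear left boundary, so the scan after sorting is O(u) instead of O(u log u) with a much smaller constant.
import Mathlib
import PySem

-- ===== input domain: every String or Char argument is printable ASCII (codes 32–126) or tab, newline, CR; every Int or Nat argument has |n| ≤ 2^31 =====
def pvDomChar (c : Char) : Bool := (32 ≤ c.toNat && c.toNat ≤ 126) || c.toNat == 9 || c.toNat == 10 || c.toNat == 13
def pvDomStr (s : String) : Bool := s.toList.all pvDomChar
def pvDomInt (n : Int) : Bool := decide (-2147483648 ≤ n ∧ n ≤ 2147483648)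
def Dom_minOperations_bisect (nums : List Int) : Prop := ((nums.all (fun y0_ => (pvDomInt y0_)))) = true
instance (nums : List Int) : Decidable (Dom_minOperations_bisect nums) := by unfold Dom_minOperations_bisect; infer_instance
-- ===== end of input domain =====

-- B replaces A's two binary searches per unique value by one amortized-linear two-pointer
-- sliding window over the sorted unique values (objective: faster scan, measured constant-factor).

-- ===== PORT A =====
-- bisect.bisect(xs, x, lo=l, hi=h) is ported as l + PySem.List.bisectRight of the xs[l:h] slice.
def minOperations_bisect (nums : List Int) : Int :=
  if nums.length == 1 then 0
  else
    let sortedUniqueNums := PySem.List.sorted (PySem.Set.ofList nums) (fun x => x)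
    let uniqueNumsLength := sortedUniqueNums.length
    let originalLength : Int := (nums.length : Int)
    (PySem.List.enumerate sortedUniqueNums).foldl (fun res p =>
      let i := p.1
      let num := p.2
      let targetLastNumber := num + originalLength - 1
      let rIdx : Nat := i.toNat + PySem.List.bisectRight (sortedUniqueNums.drop i.toNat) targetLastNumber
      -- Python's short-circuit `and` reads sortedUniqueNums[rIdx] only when rIdx < uniqueNumsLength
      let lastNumberIncluded : Bool :=
        decide (rIdx < uniqueNumsLength) && (sortedUniqueNums.getD rIdx 0 == targetLastNumber)
      let costNumIsFirst : Int :=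
        i + (originalLength - (rIdx : Int)) - (if lastNumberIncluded then 1 else 0)
      let targetFirstNumber := num - originalLength + 1
      let lIdx : Nat := PySem.List.bisectRight (sortedUniqueNums.take i.toNat) targetFirstNumber
      -- lIdx ≤ i < uniqueNumsLength whenever the loop body runs, so Python's indexing never raises
      let firstNumberIncluded : Bool := sortedUniqueNums.getD lIdx 0 == targetFirstNumber
      let costNumIsLast : Int :=
        (lIdx : Int) + (originalLength - i) - (if firstNumberIncluded then 1 else 0)
      min (min res costNumIsFirst) costNumIsLast) originalLength

-- ===== PORT B =====
-- the `while unique[right] - unique[left] >= n: left += 1` loop of Source B; the `left < u.length`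
-- guard is Python's in-range indexing (left never reaches u.length in an actual run)
def pvAdvance (u : List Int) (v n : Int) (left : Nat) : Nat :=
  if h : left < u.length then
    if n ≤ v - u[left] then pvAdvance u v n (left + 1) else left
  else left
termination_by u.length - left

def minOperations_bisect_alt (nums : List Int) : Int :=
  let n : Int := (nums.length : Int)
  let unique := PySem.List.sorted (PySem.Set.ofList nums) (fun x => x)
  ((List.range unique.length).foldl (fun st right =>
      let left := pvAdvance unique (unique.getD right 0) n st.1
      (left, min st.2 (n - ((right : Int) - (left : Int) + 1)))) ((0 : Nat), n)).2

-- ===== PRECONDITION & SPEC =====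
def Spec_minOperations_bisect (nums : List Int) (out : Int) : Prop := out = minOperations_bisect_alt nums
instance (nums : List Int) (out : Int) : Decidable (Spec_minOperations_bisect nums out) := by unfold Spec_minOperations_bisect; infer_instance

-- ===== CLAIM (what is proved, stated in full; the proofs are below) =====
def Claim_equal_minOperations_bisect : Prop := ∀ (nums : List Int), Dom_minOperations_bisect nums → Spec_minOperations_bisect nums (minOperations_bisect nums)

-- ===== LEMMAS AND PROOFS =====

-- bisectRight on a ≤-sorted list: bounds and the two index characterisations
lemma pv_cnt_le_len (u : List Int) (t : Int) (h : u.Pairwise (· ≤ ·)) :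
    PySem.List.bisectRight u t ≤ u.length :=
  (PySem.List.bisectRight_spec u t h).1

lemma pv_lt_cnt_of_le (u : List Int) (t : Int) (h : u.Pairwise (· ≤ ·))
    {j : Nat} (hj : j < u.length) (hle : u[j] ≤ t) : j < PySem.List.bisectRight u t := by
  by_contra hc
  exact absurd ((PySem.List.bisectRight_spec u t h).2.2 j hj (by omega)) (by omega)

lemma pv_cnt_le_of_lt (u : List Int) (t : Int) (h : u.Pairwise (· ≤ ·))
    {j : Nat} (hj : j < u.length) (hlt : t < u[j]) : PySem.List.bisectRight u t ≤ j := by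
  by_contra hc
  exact absurd ((PySem.List.bisectRight_spec u t h).2.1 j hj (by omega)) (by omega)

lemma pv_cnt_mono (u : List Int) (h : u.Pairwise (· ≤ ·)) {t t' : Int} (htt : t ≤ t') :
    PySem.List.bisectRight u t ≤ PySem.List.bisectRight u t' := by
  by_contra hc
  have h1 := (PySem.List.bisectRight_spec u t h).1
  have hjL : PySem.List.bisectRight u t' < u.length := by omega
  have hle : u[PySem.List.bisectRight u t'] ≤ t :=
    (PySem.List.bisectRight_spec u t h).2.1 _ hjL (by omega)
  have hgt : t' < u[PySem.List.bisectRight u t'] :=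
    (PySem.List.bisectRight_spec u t' h).2.2 _ hjL (by omega)
  omega

-- uniqueness: any index with the two characterisations IS bisectRight's value
lemma pv_bisect_eq_of (u : List Int) (t : Int) (h : u.Pairwise (· ≤ ·)) (k : Nat)
    (hk : k ≤ u.length)
    (h1 : ∀ j (_ : j < u.length), j < k → u[j] ≤ t)
    (h2 : ∀ j (_ : j < u.length), k ≤ j → t < u[j]) :
    PySem.List.bisectRight u t = k := by
  obtain ⟨hb, hb1, hb2⟩ := PySem.List.bisectRight_spec u t h
  by_contra hne
  rcases Nat.lt_or_ge (PySem.List.bisectRight u t) k with hlt | hge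
  · have hjL : PySem.List.bisectRight u t < u.length := by omega
    have := h1 _ hjL hlt
    have := hb2 _ hjL (le_refl _)
    omega
  · have hkL : k < u.length := by omega
    have := h2 _ hkL (le_refl _)
    have := hb1 _ hkL (by omega)
    omega

-- bisect with lo=i equals the full bisect when the first i elements are ≤ t
lemma pv_bisect_drop (u : List Int) (t : Int) (h : u.Pairwise (· ≤ ·)) (i : Nat)
    (hi : i ≤ u.length) (hpre : ∀ j (_ : j < u.length), j < i → u[j] ≤ t) :
    i + PySem.List.bisectRight (u.drop i) t = PySem.List.bisectRight u t := by
  have hds : (u.drop i).Pairwise (· ≤ ·) := h.sublist (List.drop_sublist i u)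
  obtain ⟨hb, hb1, hb2⟩ := PySem.List.bisectRight_spec (u.drop i) t hds
  have hdl : (u.drop i).length = u.length - i := List.length_drop
  refine (pv_bisect_eq_of u t h _ (by omega) ?_ ?_).symm
  · intro j hj hjk
    rcases Nat.lt_or_ge j i with hji | hji
    · exact hpre j hj hji
    · have hj' : j - i < (u.drop i).length := by omega
      have := hb1 (j - i) hj' (by omega)
      rw [List.getElem_drop] at this
      convert this using 2
      omega
  · intro j hj hjk
    have hj' : j - i < (u.drop i).length := by omega
    have := hb2 (j - i) hj' (by omega)
    rw [List.getElem_drop] at this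
    convert this using 2
    omega

-- bisect with hi=i equals the full bisect when the elements from i on are > t
lemma pv_bisect_take (u : List Int) (t : Int) (h : u.Pairwise (· ≤ ·)) (i : Nat)
    (hi : i ≤ u.length) (hpost : ∀ j (_ : j < u.length), i ≤ j → t < u[j]) :
    PySem.List.bisectRight (u.take i) t = PySem.List.bisectRight u t := by
  have hts : (u.take i).Pairwise (· ≤ ·) := h.sublist (List.take_sublist i u)
  obtain ⟨hb, hb1, hb2⟩ := PySem.List.bisectRight_spec (u.take i) t hts
  have htl : (u.take i).length = i := by simp [List.length_take]; omega
  refine (pv_bisect_eq_of u t h _ (by omega) ?_ ?_).symm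
  · intro j hj hjk
    have hj' : j < (u.take i).length := by omega
    have := hb1 j hj' (by omega)
    rwa [List.getElem_take] at this
  · intro j hj hjk
    rcases Nat.lt_or_ge j i with hji | hji
    · have hj' : j < (u.take i).length := by omega
      have := hb2 j hj' (by omega)
      rwa [List.getElem_take] at this
    · exact hpost j hj hji

-- the two-pointer advance stops exactly at bisectRight u (v - n)
lemma pv_advance_eq (u : List Int) (h : u.Pairwise (· ≤ ·)) (v n : Int) (left : Nat)
    (hle : left ≤ PySem.List.bisectRight u (v - n)) :
    pvAdvance u v n left = PySem.List.bisectRight u (v - n) := by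
  obtain ⟨hb, hb1, hb2⟩ := PySem.List.bisectRight_spec u (v - n) h
  generalize hd : u.length - left = d
  induction d generalizing left with
  | zero =>
    rw [pvAdvance]
    have : ¬ left < u.length := by omega
    simp only [this, dite_false]
    omega
  | succ d ih =>
    have hlL : left < u.length := by omega
    rcases Nat.lt_or_ge left (PySem.List.bisectRight u (v - n)) with hlt | hge
    · have hle' : u[left] ≤ v - n := hb1 left hlL hlt
      rw [pvAdvance]
      simp only [hlL, dite_true]
      rw [if_pos (by omega)]
      exact ih (left + 1) (by omega) (by omega)
    · have heq : left = PySem.List.bisectRight u (v - n) := by omega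
      have hgt : v - n < u[left] := hb2 left hlL (by omega)
      rw [pvAdvance]
      simp only [hlL, dite_true]
      rw [if_neg (by omega)]
      exact heq

-- tiny foldl-min toolkit (specific to the two ports' accumulators)
lemma pv_foldl_min_le_init (xs : List Int) (a : Int) : xs.foldl min a ≤ a := by
  induction xs generalizing a with
  | nil => simp
  | cons x xs ih => exact le_trans (ih _) (min_le_left _ _)

lemma pv_foldl_min_le_mem {xs : List Int} {x : Int} (hx : x ∈ xs) (a : Int) :
    xs.foldl min a ≤ x := by
  induction xs generalizing a with
  | nil => simp at hx
  | cons y ys ih =>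
    rcases List.mem_cons.mp hx with rfl | hx
    · exact le_trans (pv_foldl_min_le_init ys _) (min_le_right _ _)
    · exact ih hx _

lemma pv_le_foldl_min {xs : List Int} {a c : Int} (ha : c ≤ a) (h : ∀ x ∈ xs, c ≤ x) :
    c ≤ xs.foldl min a := by
  induction xs generalizing a with
  | nil => simpa
  | cons y ys ih =>
    exact ih (le_min ha (h y (List.mem_cons_self))) fun x hx => h x (List.mem_cons_of_mem _ hx)

-- A's two-candidate min fold flattened into a single foldl min
lemma pv_foldl_minmin_eq {α : Type} (f g : α → Int) (l : List α) (a : Int) :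
    l.foldl (fun res p => min (min res (f p)) (g p)) a
      = (l.flatMap (fun p => [f p, g p])).foldl min a := by
  induction l generalizing a with
  | nil => rfl
  | cons p l ih => simpa using ih (min (min a (f p)) (g p))

-- B's stateful fold: the left pointer is always bisectRight u (u[right] - n)
lemma pv_B_fold (u : List Int) (h : u.Pairwise (· ≤ ·)) (n : Int) :
    ∀ (k s left : Nat) (a : Int), s + k = u.length →
    (∀ hsL : s < u.length, left ≤ PySem.List.bisectRight u (u[s] - n)) →
    ((List.range' s k).foldl (fun st right =>
        let l2 := pvAdvance u (u.getD right 0) n st.1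
        (l2, min st.2 (n - ((right : Int) - (l2 : Int) + 1)))) (left, a)).2
      = ((List.range' s k).map (fun (i : Nat) =>
          n - ((i : Int) - (PySem.List.bisectRight u (u.getD i 0 - n) : Int) + 1))).foldl min a := by
  intro k
  induction k with
  | zero => intro s left a _ _; simp
  | succ k ih =>
    intro s left a hsk hleft
    have hsL : s < u.length := by omega
    have hgd : u.getD s 0 = u[s] := List.getD_eq_getElem u 0 hsL
    rw [List.range'_succ, List.foldl_cons, List.map_cons, List.foldl_cons]
    dsimp only
    rw [hgd, pv_advance_eq u h u[s] n left (hleft hsL)]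
    refine ih (s + 1) _ _ (by omega) ?_
    intro hs1
    have hus : u[s] ≤ u[s + 1] :=
      List.pairwise_iff_getElem.mp h s (s + 1) hsL hs1 (by omega)
    exact pv_cnt_mono u h (by omega)

-- ===== VERDICT (by name: the statement is the Claim_ definition above) =====
-- the two candidate costs of A's loop body after the dead boolean flags are discharged
theorem minOperations_bisect_spec : Claim_equal_minOperations_bisect := by
  intro nums _dom
  unfold Spec_minOperations_bisect
  by_cases hlen : nums.length = 1
  · -- singleton list: A early-returns 0, B computes min 1 (1 - 1) = 0
    obtain ⟨x, rfl⟩ := List.length_eq_one_iff.mp hlen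
    have hof : PySem.Set.ofList [x] = [x] := rfl
    have hsx : PySem.List.sorted [x] (fun y => y) = [x] :=
      PySem.List.sorted_eq_self_of_pairwise _ _ (by simp)
    simp [minOperations_bisect, minOperations_bisect_alt, hof, hsx,
      List.range_succ, pvAdvance]
  · have hne : (nums.length == 1) = false := by simpa using hlen
    set u := PySem.List.sorted (PySem.Set.ofList nums) (fun x => x) with hu
    set n : Int := (nums.length : Int) with hn
    have hlt : u.Pairwise (· < ·) := PySem.List.sorted_ofList_pairwise_lt nums
    have hle : u.Pairwise (· ≤ ·) := hlt.imp le_of_lt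
    have hLn : u.length ≤ nums.length := by
      rw [hu, PySem.List.length_sorted]; exact PySem.Set.length_ofList_le nums
    have hn2 : 0 < u.length → 2 ≤ nums.length := fun h0 => by omega
    have humono : ∀ (a b : Nat) (_ : a < u.length) (_ : b < u.length), a ≤ b → u[a] ≤ u[b] := by
      intro a b ha hb hab
      rcases Nat.lt_or_ge a b with hab' | hab'
      · exact List.pairwise_iff_getElem.mp hle a b ha hb hab'
      · have : a = b := by omega
        subst this; exact le_refl _
    simp only [minOperations_bisect, minOperations_bisect_alt, hne, Bool.false_eq_true,
      if_false, ← hu, ← hn]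
    -- B side: eliminate the left-pointer state
    rw [List.range_eq_range',
      pv_B_fold u hle n u.length 0 0 n (by omega) (fun _ => Nat.zero_le _)]
    -- A side: simplify the loop body and flatten the two-candidate min
    rw [PySem.List.foldl_congr_mem (PySem.List.enumerate u) _
      (fun res p => min (min res (p.1 + (n - (PySem.List.bisectRight u (p.2 + n - 1) : Int))))
        ((PySem.List.bisectRight u (p.2 - n + 1) : Int) + (n - p.1))) n ?hpt]
    case hpt =>
      intro acc p hp
      obtain ⟨k, hkL, rfl⟩ := (PySem.List.mem_enumerate_iff _ _ _).mp hp
      have hnk2 : 2 ≤ nums.length := hn2 (by omega)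
      dsimp only
      simp only [zero_add, Int.toNat_natCast]
      have ht1 : ∀ j (_ : j < u.length), j < k → u[j] ≤ u[k] + n - 1 := by
        intro j hj hjk
        have := humono j k hj hkL (by omega)
        omega
      rw [pv_bisect_drop u (u[k] + n - 1) hle k (le_of_lt hkL) ht1]
      have ht2 : ∀ j (_ : j < u.length), k ≤ j → u[k] - n + 1 < u[j] := by
        intro j hj hjk
        have := humono k j hkL hj hjk
        omega
      rw [pv_bisect_take u (u[k] - n + 1) hle k (le_of_lt hkL) ht2]
      have hlast : (decide (PySem.List.bisectRight u (u[k] + n - 1) < u.length) &&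
          (u.getD (PySem.List.bisectRight u (u[k] + n - 1)) 0 == u[k] + n - 1)) = false := by
        by_cases hr : PySem.List.bisectRight u (u[k] + n - 1) < u.length
        · have := (PySem.List.bisectRight_spec u (u[k] + n - 1) hle).2.2 _ hr (le_refl _)
          rw [List.getD_eq_getElem u 0 hr]
          simp only [hr, decide_true, Bool.true_and, beq_eq_false_iff_ne]
          omega
        · simp [hr]
      rw [hlast]
      have hC2L : PySem.List.bisectRight u (u[k] - n + 1) < u.length := by
        have := pv_cnt_le_of_lt u (u[k] - n + 1) hle hkL (by omega)
        omega
      have hfirst : (u.getD (PySem.List.bisectRight u (u[k] - n + 1)) 0 == u[k] - n + 1) = false := by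
        have := (PySem.List.bisectRight_spec u (u[k] - n + 1) hle).2.2 _ hC2L (le_refl _)
        rw [List.getD_eq_getElem u 0 hC2L]
        simp only [beq_eq_false_iff_ne]
        omega
      rw [hfirst]
      norm_num
    rw [pv_foldl_minmin_eq]
    -- both sides are now foldl min n over explicit candidate lists; prove ≤ both ways
    apply le_antisymm
    · -- A ≤ B : every B-candidate dominates some A-candidate
      refine pv_le_foldl_min (pv_foldl_min_le_init _ _) ?_
      intro x hx
      obtain ⟨i, hi, rfl⟩ := List.mem_map.mp hx
      have hiL : i < u.length := by
        have := (List.mem_range'_1).mp hi; omega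
      have hnk2 : 2 ≤ nums.length := hn2 (by omega)
      have hgd : u.getD i 0 = u[i] := List.getD_eq_getElem u 0 hiL
      rw [hgd]
      have hc0i : PySem.List.bisectRight u (u[i] - n) ≤ i :=
        pv_cnt_le_of_lt u (u[i] - n) hle hiL (by omega)
      have hc0L : PySem.List.bisectRight u (u[i] - n) < u.length := by omega
      have hgt : u[i] - n < u[PySem.List.bisectRight u (u[i] - n)] :=
        (PySem.List.bisectRight_spec u (u[i] - n) hle).2.2 _ hc0L (le_refl _)
      have hC : i < PySem.List.bisectRight u (u[PySem.List.bisectRight u (u[i] - n)] + n - 1) :=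
        pv_lt_cnt_of_le u _ hle hiL (by omega)
      have hmem : (((PySem.List.bisectRight u (u[i] - n) : Nat) : Int) +
          (n - (PySem.List.bisectRight u (u[PySem.List.bisectRight u (u[i] - n)] + n - 1) : Int))) ∈
          (PySem.List.enumerate u).flatMap (fun p =>
            [p.1 + (n - (PySem.List.bisectRight u (p.2 + n - 1) : Int)),
             (PySem.List.bisectRight u (p.2 - n + 1) : Int) + (n - p.1)]) := by
        refine List.mem_flatMap.mpr
          ⟨(((PySem.List.bisectRight u (u[i] - n) : Nat) : Int),
            u[PySem.List.bisectRight u (u[i] - n)]), ?_, ?_⟩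
        · exact (PySem.List.mem_enumerate_iff _ _ _).mpr ⟨_, hc0L, by simp⟩
        · simp
      have hA := pv_foldl_min_le_mem hmem n
      omega
    · -- B ≤ A : every A-candidate dominates some B-candidate
      refine pv_le_foldl_min (pv_foldl_min_le_init _ _) ?_
      intro x hx
      obtain ⟨p, hp, hxp⟩ := List.mem_flatMap.mp hx
      obtain ⟨k, hkL, rfl⟩ := (PySem.List.mem_enumerate_iff _ _ _).mp hp
      have hnk2 : 2 ≤ nums.length := hn2 (by omega)
      have hgdk : u.getD k 0 = u[k] := List.getD_eq_getElem u 0 hkL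
      simp only [List.mem_cons, List.not_mem_nil, or_false] at hxp
      rcases hxp with rfl | rfl
      · -- A's "num as first" candidate
        have hkC : k < PySem.List.bisectRight u (u[k] + n - 1) :=
          pv_lt_cnt_of_le u _ hle hkL (by omega)
        have hC1L : PySem.List.bisectRight u (u[k] + n - 1) ≤ u.length :=
          pv_cnt_le_len u _ hle
        have hjL : PySem.List.bisectRight u (u[k] + n - 1) - 1 < u.length := by omega
        have huj : u[PySem.List.bisectRight u (u[k] + n - 1) - 1] ≤ u[k] + n - 1 :=
          (PySem.List.bisectRight_spec u (u[k] + n - 1) hle).2.1 _ hjL (by omega)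
        have hcj : PySem.List.bisectRight u (u[PySem.List.bisectRight u (u[k] + n - 1) - 1] - n) ≤ k :=
          pv_cnt_le_of_lt u _ hle hkL (by omega)
        have hmemB : (n - (((PySem.List.bisectRight u (u[k] + n - 1) - 1 : Nat) : Int) -
            (PySem.List.bisectRight u (u.getD (PySem.List.bisectRight u (u[k] + n - 1) - 1) 0 - n) : Int) + 1)) ∈
            (List.range' 0 u.length).map (fun (i : Nat) =>
              n - ((i : Int) - (PySem.List.bisectRight u (u.getD i 0 - n) : Int) + 1)) :=
          List.mem_map.mpr ⟨_, List.mem_range'_1.mpr ⟨Nat.zero_le _, by omega⟩, rfl⟩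
        have hB := pv_foldl_min_le_mem hmemB n
        rw [List.getD_eq_getElem u 0 hjL] at hB
        omega
      · -- A's "num as last" candidate
        have hmemB : (n - ((k : Int) -
            (PySem.List.bisectRight u (u.getD k 0 - n) : Int) + 1)) ∈
            (List.range' 0 u.length).map (fun (i : Nat) =>
              n - ((i : Int) - (PySem.List.bisectRight u (u.getD i 0 - n) : Int) + 1)) :=
          List.mem_map.mpr ⟨_, List.mem_range'_1.mpr ⟨Nat.zero_le _, by omega⟩, rfl⟩
        have hB := pv_foldl_min_le_mem hmemB n
        rw [hgdk] at hB
        have hmono : PySem.List.bisectRight u (u[k] - n) ≤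
            PySem.List.bisectRight u (u[k] - n + 1) := pv_cnt_mono u hle (by omega)
        omega
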